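-- pv_equiv track=rewrite | github.com/fredehur/CRQ-APP | poc/seerist-rsm/tools/poi_proximity.py | _walk_downstream
-- ===== SOURCE A (Python) =====
-- CASCADE_MAX_DEPTH = 2
--
-- def _walk_downstream(start: str, graph: dict, max_depth: int = CASCADE_MAX_DEPTH) -> set[str]:
--     """BFS downstream from `start`, capped at max_depth, cycle-safe.
--     Returns the set of visited site_ids INCLUDING `start`."""
--     visited = {start}
--     frontier = [(start, 0)]
--     while frontier:
--         node, depth = frontier.pop(0)
--         if depth >= max_depth:
--             continue
--         for child in graph.get(node, {}).get("feeds_into", []):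
--             if child not in visited:
--                 visited.add(child)
--                 frontier.append((child, depth + 1))
--     return visited
-- ===== SOURCE B (Python) =====
-- CASCADE_MAX_DEPTH = 2
--
-- def _walk_downstream(start: str, graph: dict, max_depth: int = CASCADE_MAX_DEPTH) -> set[str]:
--     """Naive closure iteration: no queue, no frontier, no per-node depths.
--     Keep only the reach set; each round recompute the edge-image of the
--     WHOLE set and union it in, stopping at a fixpoint or after max_depth
--     rounds.  Correct because after k rounds reach = nodes within k edges
--     of start, and once the image adds nothing it never will again."""
--     reach = {start}
--     for _ in range(max_depth):
--         image = {c for n in reach for c in graph.get(n, {}).get("feeds_into", [])}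
--         if image <= reach:
--             break
--         reach |= image
--     return reach
-- ===== Notes on version B (the rewrite author's own statement) =====
-- stated objective: alternative
-- what changed: Replaced BFS with a FIFO queue of (node, depth) tuples by naive closure (fixpoint) iteration: no queue, no frontier and no per-node depths are kept, only the reach set; each round recomputes the edge-image of the whole set and unions it in, stopping at a fixpoint or after max_depth rounds.
import Mathlib
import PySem

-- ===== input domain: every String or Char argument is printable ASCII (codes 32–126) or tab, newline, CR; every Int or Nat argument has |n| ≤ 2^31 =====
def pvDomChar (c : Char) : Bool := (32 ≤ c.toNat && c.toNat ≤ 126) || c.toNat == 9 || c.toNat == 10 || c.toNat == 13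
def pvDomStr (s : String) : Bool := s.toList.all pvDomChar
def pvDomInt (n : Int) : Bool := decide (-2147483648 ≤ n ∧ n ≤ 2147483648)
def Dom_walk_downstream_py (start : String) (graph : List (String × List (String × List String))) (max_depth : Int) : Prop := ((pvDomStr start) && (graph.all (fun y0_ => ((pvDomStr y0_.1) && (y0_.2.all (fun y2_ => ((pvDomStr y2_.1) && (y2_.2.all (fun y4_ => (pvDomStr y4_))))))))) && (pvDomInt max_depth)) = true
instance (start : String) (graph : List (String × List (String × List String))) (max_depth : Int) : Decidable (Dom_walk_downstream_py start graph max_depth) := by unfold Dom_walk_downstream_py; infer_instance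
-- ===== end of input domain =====

-- B replaces A's FIFO-queue BFS (with (node, depth) tuples) by naive closure iteration:
-- only the reach set is kept and the edge-image of the whole set is recomputed and
-- unioned in each round, up to a fixpoint or max_depth rounds: alternative decomposition.


-- graph.get(node, {}).get("feeds_into", []) — shared dict-lookup helper for both ports
def pvChildren (graph : List (String × List (String × List String))) (node : String) : List String :=
  PySem.Dict.getD (PySem.Dict.mk (PySem.Dict.getD (PySem.Dict.mk graph) node [])) "feeds_into" []

-- ===== PORT A =====
-- every child string occurring anywhere in the graph (termination measure only)
def pvPool (graph : List (String × List (String × List String))) : List String :=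
  graph.flatMap (fun p => PySem.Dict.getD (PySem.Dict.mk p.2) "feeds_into" [])

def pvUnvis (graph : List (String × List (String × List String))) (v : List String) : Nat :=
  (pvPool graph).countP (fun c => !(decide (c ∈ v)))

-- body of A's inner 'for child in …' loop
def pvStepA (depth : Int) (acc : List String × List (String × Int)) (child : String) :
    List String × List (String × Int) :=
  if PySem.Set.contains acc.1 child then acc
  else (PySem.Set.add acc.1 child, acc.2 ++ [(child, depth + 1)])

theorem pvContains_eq (v : List String) (c : String) :
    (PySem.Set.contains v c = true) = (c ∈ v) := propext (PySem.Set.contains_iff v c)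

theorem pvChildren_subset_pool (graph : List (String × List (String × List String))) (node c : String)
    (h : c ∈ pvChildren graph node) : c ∈ pvPool graph := by
  induction graph with
  | nil =>
    simp [pvChildren, PySem.Dict.getD, PySem.Dict.get?] at h
  | cons p rest ih =>
    unfold pvChildren at h
    have hv : PySem.Dict.getD (PySem.Dict.mk (p :: rest)) node []
        = (if p.1 == node then p.2 else PySem.Dict.getD (PySem.Dict.mk rest) node []) := by
      rw [PySem.Dict.getD_eq_get?_getD, PySem.Dict.get?_mk_cons]
      by_cases hk : p.1 == node <;> simp [hk, PySem.Dict.getD_eq_get?_getD]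
    rw [hv] at h
    by_cases hk : (p.1 == node) = true
    · rw [if_pos hk] at h
      exact List.mem_flatMap.mpr ⟨p, List.mem_cons_self .., h⟩
    · rw [if_neg hk] at h
      have hr : c ∈ pvChildren rest node := by unfold pvChildren; exact h
      rcases List.mem_flatMap.mp (ih hr) with ⟨q, hq, hc⟩
      exact List.mem_flatMap.mpr ⟨q, List.mem_cons_of_mem _ hq, hc⟩

theorem pvCountP_lt {α : Type} (p q : α → Bool) (l : List α) (c : α) (hc : c ∈ l)
    (hp : p c = true) (hq : q c = false) (mono : ∀ x, q x = true → p x = true) :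
    l.countP q < l.countP p := by
  induction l with
  | nil => cases hc
  | cons a t ih =>
    rcases List.mem_cons.mp hc with rfl | hct
    · have h1 : t.countP q ≤ t.countP p := List.countP_mono_left (fun x _ => mono x)
      simp [hp, hq]; omega
    · have h1 := ih hct
      by_cases ha : q a = true
      · simp [ha, mono a ha]; omega
      · simp at ha
        simp [List.countP_cons, ha]
        by_cases hpa : p a = true <;> simp [hpa] <;> omega

theorem pvUnvis_append_lt (graph : List (String × List (String × List String)))
    (v : List String) (c : String) (hc : c ∈ pvPool graph)
    (hv : c ∉ v) :
    pvUnvis graph (v ++ [c]) < pvUnvis graph v := by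
  unfold pvUnvis
  apply pvCountP_lt _ _ _ c hc
  · simp [hv]
  · simp
  · intro x hx
    simp at hx ⊢
    exact hx.1

theorem pvStepA_measure (graph : List (String × List (String × List String))) (d : Int) :
    ∀ (children : List String) (v : List String) (n : List (String × Int)),
      (∀ c ∈ children, c ∈ pvPool graph) →
      2 * pvUnvis graph (List.foldl (pvStepA d) (v, n) children).1
        + (List.foldl (pvStepA d) (v, n) children).2.length
      ≤ 2 * pvUnvis graph v + n.length := by
  intro children
  induction children with
  | nil => intro v n _; simp
  | cons c cs ih =>
    intro v n hsub
    by_cases hm : c ∈ v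
    · simp only [List.foldl_cons, pvStepA, pvContains_eq]
      rw [if_pos hm]
      exact ih v n (fun x hx => hsub x (List.mem_cons_of_mem _ hx))
    · have hadd : PySem.Set.add v c = v ++ [c] := PySem.Set.add_of_not_mem hm
      have hlt := pvUnvis_append_lt graph v c (hsub c (List.mem_cons_self ..)) hm
      have hih := ih (v ++ [c]) (n ++ [(c, d + 1)]) (fun x hx => hsub x (List.mem_cons_of_mem _ hx))
      simp only [List.foldl_cons, pvStepA, pvContains_eq]
      rw [if_neg hm, hadd]
      simp only [List.length_append, List.length_cons, List.length_nil] at hih ⊢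
      omega

def walkA (graph : List (String × List (String × List String))) (maxd : Int)
    (visited : List String) (frontier : List (String × Int)) : List String :=
  match frontier with
  | [] => visited
  | (node, depth) :: rest =>
    if maxd ≤ depth then walkA graph maxd visited rest
    else
      let s := (pvChildren graph node).foldl (pvStepA depth) (visited, [])
      walkA graph maxd s.1 (rest ++ s.2)
termination_by 2 * pvUnvis graph visited + frontier.length
decreasing_by
  · simp
  · have := pvStepA_measure graph depth (pvChildren graph node) visited []
      (fun c hc => pvChildren_subset_pool graph node c hc)
    simp at this ⊢
    omega

def walk_downstream_py (start : String) (graph : List (String × List (String × List String))) (max_depth : Int) : List String :=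
  walkA graph max_depth (PySem.Set.ofList [start]) [(start, 0)]

-- ===== PORT B =====
-- {c for n in reach for c in graph.get(n, {}).get("feeds_into", [])}
def pvImage (graph : List (String × List (String × List String))) (reach : List String) : List String :=
  PySem.Set.ofList (reach.flatMap (fun n => pvChildren graph n))

-- the 'for _ in range(max_depth)' loop: image, subset test (break), union
def walkFix (graph : List (String × List (String × List String))) :
    List String → Nat → List String
  | reach, 0 => reach
  | reach, Nat.succ k =>
    let img := pvImage graph reach
    if PySem.Set.issubset img reach then reach
    else walkFix graph (PySem.Set.union reach img) k

def walk_downstream_py_alt (start : String) (graph : List (String × List (String × List String))) (max_depth : Int) : List String :=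
  walkFix graph (PySem.Set.ofList [start]) max_depth.toNat

-- ===== PRECONDITION & SPEC =====
def Spec_walk_downstream_py (start : String) (graph : List (String × List (String × List String))) (max_depth : Int) (out : List String) : Prop := out = walk_downstream_py_alt start graph max_depth
instance (start : String) (graph : List (String × List (String × List String))) (max_depth : Int) (out : List String) : Decidable (Spec_walk_downstream_py start graph max_depth out) := by unfold Spec_walk_downstream_py; infer_instance

-- ===== CLAIM (what is proved, stated in full; the proofs are below) =====
def Claim_equal_walk_downstream_py : Prop := ∀ (start : String) (graph : List (String × List (String × List String))) (max_depth : Int), Dom_walk_downstream_py start graph max_depth → Spec_walk_downstream_py start graph max_depth (walk_downstream_py start graph max_depth)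

-- ===== LEMMAS AND PROOFS =====

-- proof-only: A's inner loop with the next level tracked, and its per-level fold
def pvStepB (acc : List String × List String) (child : String) : List String × List String :=
  if PySem.Set.contains acc.1 child then acc
  else (PySem.Set.add acc.1 child, acc.2 ++ [child])

def pvLevel (graph : List (String × List (String × List String)))
    (acc : List String × List String) (node : String) : List String × List String :=
  (pvChildren graph node).foldl pvStepB acc

-- proof-only: the elements of l not yet in v, first occurrences, in order
def pvNews (v : List String) : List String → List String
  | [] => []
  | c :: t => if c ∈ v then pvNews v t else c :: pvNews (v ++ [c]) t

theorem pvUpdate_eq_news : ∀ (l v : List String),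
    PySem.Set.update v l = v ++ pvNews v l := by
  intro l
  induction l with
  | nil => intro v; simp [PySem.Set.update_nil, pvNews]
  | cons c t ih =>
    intro v
    rw [PySem.Set.update_cons]
    by_cases h : c ∈ v
    · rw [PySem.Set.add_of_mem h, ih v, pvNews]
      simp [h]
    · rw [PySem.Set.add_of_not_mem h, ih (v ++ [c]), pvNews]
      simp [h]

theorem pvNews_append : ∀ (l1 l2 v : List String),
    pvNews v (l1 ++ l2) = pvNews v l1 ++ pvNews (v ++ pvNews v l1) l2 := by
  intro l1
  induction l1 with
  | nil => intro l2 v; simp [pvNews]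
  | cons c t ih =>
    intro l2 v
    by_cases h : c ∈ v
    · simp only [List.cons_append, pvNews, if_pos h]
      exact ih l2 v
    · simp only [List.cons_append, pvNews, if_neg h]
      rw [ih l2 (v ++ [c])]
      simp [List.append_assoc]

theorem pvNews_nil_of_subset : ∀ (l v : List String), (∀ x ∈ l, x ∈ v) → pvNews v l = [] := by
  intro l
  induction l with
  | nil => intro v _; rfl
  | cons c t ih =>
    intro v h
    rw [pvNews, if_pos (h c (List.mem_cons_self ..))]
    exact ih v (fun x hx => h x (List.mem_cons_of_mem _ hx))

theorem pvNews_news : ∀ (l s v : List String), (∀ x ∈ s, x ∈ v) →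
    pvNews v (pvNews s l) = pvNews v l := by
  intro l
  induction l with
  | nil => intro s v _; rfl
  | cons c t ih =>
    intro s v hs
    by_cases hcs : c ∈ s
    · have hcv : c ∈ v := hs c hcs
      simp only [pvNews, hcs, hcv, if_true]
      exact ih s v hs
    · by_cases hcv : c ∈ v
      · have hsc : ∀ x ∈ s ++ [c], x ∈ v := by
          intro x hx
          rcases List.mem_append.mp hx with h | h
          · exact hs x h
          · simp at h; subst h; exact hcv
        simp only [pvNews, hcs, hcv, if_true, if_false]
        exact ih (s ++ [c]) v hsc
      · have hsc : ∀ x ∈ s ++ [c], x ∈ v ++ [c] := by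
          intro x hx
          rcases List.mem_append.mp hx with h | h
          · exact List.mem_append_left _ (hs x h)
          · exact List.mem_append_right _ h
        simp only [pvNews, hcs, hcv, if_false]
        rw [ih (s ++ [c]) (v ++ [c]) hsc]

theorem pvOfList_eq_news (l : List String) : PySem.Set.ofList l = pvNews [] l := by
  rw [PySem.Set.ofList_eq_foldl]
  have h := pvUpdate_eq_news l []
  simpa [PySem.Set.update] using h

theorem pvUpdate_ofList (v l : List String) :
    PySem.Set.update v (PySem.Set.ofList l) = PySem.Set.update v l := by
  rw [pvOfList_eq_news, pvUpdate_eq_news, pvUpdate_eq_news,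
    pvNews_news l [] v (by simp)]

theorem pvStepB_fold : ∀ (l v n : List String),
    List.foldl pvStepB (v, n) l = (v ++ pvNews v l, n ++ pvNews v l) := by
  intro l
  induction l with
  | nil => intro v n; simp [pvNews]
  | cons c t ih =>
    intro v n
    by_cases h : c ∈ v
    · simp only [List.foldl_cons, pvStepB, pvContains_eq]
      rw [if_pos h, ih v n, pvNews, if_pos h]
    · simp only [List.foldl_cons, pvStepB, pvContains_eq]
      rw [if_neg h, PySem.Set.add_of_not_mem h, ih (v ++ [c]) (n ++ [c]), pvNews, if_neg h]
      simp

theorem pvLevel_fold (graph : List (String × List (String × List String))) :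
    ∀ (cur v n : List String),
      List.foldl (pvLevel graph) (v, n) cur
      = (v ++ pvNews v (cur.flatMap (pvChildren graph)),
          n ++ pvNews v (cur.flatMap (pvChildren graph))) := by
  intro cur
  induction cur with
  | nil => intro v n; simp [pvNews]
  | cons node t ih =>
    intro v n
    simp only [List.foldl_cons, pvLevel, pvStepB_fold]
    rw [ih]
    simp only [List.flatMap_cons, pvNews_append]
    simp [List.append_assoc]

-- body of A's inner loop, bridged to the tracked version
theorem stepBridge (d : Int) : ∀ (children : List String) (v n : List String),
    List.foldl (pvStepA d) (v, n.map (fun c => (c, d + 1))) children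
    = ((List.foldl pvStepB (v, n) children).1,
        (List.foldl pvStepB (v, n) children).2.map (fun c => (c, d + 1))) := by
  intro children
  induction children with
  | nil => intro v n; simp
  | cons c cs ih =>
    intro v n
    by_cases hm : c ∈ v
    · simp only [List.foldl_cons, pvStepA, pvStepB, pvContains_eq]
      rw [if_pos hm, if_pos hm, ih v n]
    · simp only [List.foldl_cons, pvStepA, pvStepB, pvContains_eq]
      rw [if_neg hm, if_neg hm]
      have : n.map (fun c => (c, d + 1)) ++ [(c, d + 1)]
          = (n ++ [c]).map (fun c => (c, d + 1)) := by simp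
      rw [this, ih (PySem.Set.add v c) (n ++ [c])]

theorem walkA_skip (graph : List (String × List (String × List String))) (maxd : Int) :
    ∀ (frontier : List (String × Int)) (visited : List String),
      (∀ e ∈ frontier, maxd ≤ e.2) → walkA graph maxd visited frontier = visited := by
  intro frontier
  induction frontier with
  | nil => intro v _; rw [walkA]
  | cons e rest ih =>
    intro v h
    rw [walkA]
    simp only [if_pos (h e (List.mem_cons_self ..))]
    exact ih v (fun x hx => h x (List.mem_cons_of_mem _ hx))

theorem walkA_level (graph : List (String × List (String × List String))) (maxd d : Int)
    (hd : d < maxd) :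
    ∀ (cur visited nxt : List String),
      walkA graph maxd visited
        (cur.map (fun c => (c, d)) ++ nxt.map (fun c => (c, d + 1)))
      = walkA graph maxd (List.foldl (pvLevel graph) (visited, nxt) cur).1
          ((List.foldl (pvLevel graph) (visited, nxt) cur).2.map (fun c => (c, d + 1))) := by
  intro cur
  induction cur with
  | nil => intro v nxt; simp
  | cons node cs ih =>
    intro v nxt
    simp only [List.map_cons, List.cons_append]
    rw [walkA]
    simp only [if_neg (by omega : ¬ maxd ≤ d)]
    rw [show (pvChildren graph node).foldl (pvStepA d) (v, [])
        = ((List.foldl pvStepB (v, []) (pvChildren graph node)).1,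
            (List.foldl pvStepB (v, []) (pvChildren graph node)).2.map (fun c => (c, d + 1)))
      from by simpa using stepBridge d (pvChildren graph node) v []]
    have hfr :
        (cs.map (fun c => (c, d)) ++ nxt.map (fun c => (c, d + 1)))
          ++ (List.foldl pvStepB (v, []) (pvChildren graph node)).2.map (fun c => (c, d + 1))
        = cs.map (fun c => (c, d))
          ++ (nxt ++ (List.foldl pvStepB (v, []) (pvChildren graph node)).2).map
              (fun c => (c, d + 1)) := by
      simp
    rw [hfr,
      ih (List.foldl pvStepB (v, []) (pvChildren graph node)).1
        (nxt ++ (List.foldl pvStepB (v, []) (pvChildren graph node)).2)]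
    have hstep : pvLevel graph (v, nxt) node
        = ((List.foldl pvStepB (v, []) (pvChildren graph node)).1,
            nxt ++ (List.foldl pvStepB (v, []) (pvChildren graph node)).2) := by
      rw [pvLevel, pvStepB_fold, pvStepB_fold]
      simp
    simp only [List.foldl_cons, hstep]

-- main bridge: walkA on a level frontier vs the fixpoint iteration, with the
-- invariant that every already-expanded node (in p) has all children inside v
theorem walkA_walkFix (graph : List (String × List (String × List String))) (maxd : Int) :
    ∀ (k : Nat) (d : Int) (p cur v : List String),
      v = p ++ cur →
      (∀ n ∈ p, ∀ c ∈ pvChildren graph n, c ∈ v) →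
      ((k : Int) = maxd - d ∨ (maxd ≤ d ∧ k = 0)) →
      walkA graph maxd v (cur.map (fun c => (c, d))) = walkFix graph v k := by
  intro k
  induction k with
  | zero =>
    intro d p cur v _ _ hk
    have hd : maxd ≤ d := by
      rcases hk with h | h
      · omega
      · exact h.1
    rw [walkFix, walkA_skip graph maxd _ v
      (by intro e he; simp only [List.mem_map] at he; rcases he with ⟨c, _, rfl⟩; exact hd)]
  | succ k ih =>
    intro d p cur v hv hp hk
    have hkd : (k : Int) + 1 = maxd - d := by
      rcases hk with h | h
      · push_cast at h; omega
      · exact absurd h.2 (by omega)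
    have hd : d < maxd := by omega
    -- the whole-set image and its parts
    have hflat : v.flatMap (pvChildren graph)
        = p.flatMap (pvChildren graph) ++ cur.flatMap (pvChildren graph) := by
      rw [hv, List.flatMap_append]
    have hpflat : ∀ x ∈ p.flatMap (pvChildren graph), x ∈ v := by
      intro x hx
      rcases List.mem_flatMap.mp hx with ⟨n, hn, hc⟩
      exact hp n hn x hc
    -- A does one level
    have hA : walkA graph maxd v (cur.map (fun c => (c, d)))
        = walkA graph maxd (v ++ pvNews v (cur.flatMap (pvChildren graph)))
            ((pvNews v (cur.flatMap (pvChildren graph))).map (fun c => (c, d + 1))) := by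
      have h := walkA_level graph maxd d hd cur v []
      rw [pvLevel_fold] at h
      simpa using h
    rw [walkFix]
    by_cases hsub : PySem.Set.issubset (pvImage graph v) v = true
    · -- fixpoint reached: the next level is empty on the A side too
      simp only [hsub, if_true]
      have hsub' : ∀ x ∈ v.flatMap (pvChildren graph), x ∈ v := by
        intro x hx
        exact (PySem.Set.issubset_iff _ _).mp hsub x ((PySem.Set.mem_ofList _ _).mpr hx)
      have hnil : pvNews v (cur.flatMap (pvChildren graph)) = [] :=
        pvNews_nil_of_subset _ v
          (fun x hx => hsub' x (by rw [hflat]; exact List.mem_append_right _ hx))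
      rw [hA, hnil]
      simp only [List.map_nil, List.append_nil]
      rw [walkA]
    · simp only [hsub]
      -- the union is exactly v extended by the new level
      have h1 : PySem.Set.update v (p.flatMap (pvChildren graph)) = v := by
        rw [pvUpdate_eq_news, pvNews_nil_of_subset _ v hpflat, List.append_nil]
      have hupd : PySem.Set.union v (pvImage graph v)
          = v ++ pvNews v (cur.flatMap (pvChildren graph)) := by
        show PySem.Set.update v (pvImage graph v) = _
        rw [pvImage, pvUpdate_ofList, hflat, PySem.Set.update_append, h1,
          pvUpdate_eq_news]
      rw [hA, hupd]
      apply ih (d + 1) v (pvNews v (cur.flatMap (pvChildren graph)))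
      · rfl
      · intro n hn c hc
        rw [← pvUpdate_eq_news, PySem.Set.mem_update]
        rw [hv] at hn
        rcases List.mem_append.mp hn with hnp | hnc
        · exact Or.inl (hp n hnp c hc)
        · exact Or.inr (List.mem_flatMap.mpr ⟨n, hnc, hc⟩)
      · left; omega

-- ===== VERDICT (by name: the statement is the Claim_ definition above) =====
theorem walk_downstream_py_spec : Claim_equal_walk_downstream_py := by
  unfold Claim_equal_walk_downstream_py
  intro start graph maxd _
  unfold Spec_walk_downstream_py walk_downstream_py walk_downstream_py_alt
  have h := walkA_walkFix graph maxd maxd.toNat 0 [] [start] (PySem.Set.ofList [start])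
    (by rfl) (by intro n hn; cases hn) (by omega)
  simpa using h
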